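-- pv_equiv track=rewrite | github.com/GloireLINVANI/CSC_51054_EP-ML-and-DL-Challenge | data_preprocessing.py | is_key_period
-- ===== SOURCE A (Python) =====
-- def is_key_period(normalized_period):
--     """
--     Determine if the PeriodID corresponds to a key period.
--     """
--     key_periods = [0, 45, 110, 120, 135,
--                    160]  # Key moments: Kickoff, Halftime, End of 90 mins, Start of Extensions, Halftime in Extensions, End of Extensions
--     margin = 5  # Allowable deviation
--
--     # Check if normalized_period is close to any key period
--     is_near_key_period = any(abs(normalized_period - kp) <= margin for kp in key_periods)
--
--     # Check if it's within the halftime or extensions halftime ranges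
--     in_halftime_range = 45 <= normalized_period <= 65
--     in_extensions_halftime_range = 135 <= normalized_period <= 145
--
--     return int(is_near_key_period or in_halftime_range or in_extensions_halftime_range)
-- ===== SOURCE B (Python) =====
-- def is_key_period(normalized_period):
--     """Determine if the PeriodID corresponds to a key period."""
--     # Merged acceptable intervals (key moments +/- 5 combined with the halftime ranges)
--     intervals = [(-5, 5), (40, 65), (105, 125), (130, 145), (155, 165)]
--     return int(any(lo <= normalized_period <= hi for lo, hi in intervals))
-- ===== Notes on version B (the rewrite author's own statement) =====
-- stated objective: simpler
-- what changed: Replaced the six key-point-with-margin checks plus two explicit range checks by a single membership test over a precomputed list of five merged closed intervals.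
import Mathlib
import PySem

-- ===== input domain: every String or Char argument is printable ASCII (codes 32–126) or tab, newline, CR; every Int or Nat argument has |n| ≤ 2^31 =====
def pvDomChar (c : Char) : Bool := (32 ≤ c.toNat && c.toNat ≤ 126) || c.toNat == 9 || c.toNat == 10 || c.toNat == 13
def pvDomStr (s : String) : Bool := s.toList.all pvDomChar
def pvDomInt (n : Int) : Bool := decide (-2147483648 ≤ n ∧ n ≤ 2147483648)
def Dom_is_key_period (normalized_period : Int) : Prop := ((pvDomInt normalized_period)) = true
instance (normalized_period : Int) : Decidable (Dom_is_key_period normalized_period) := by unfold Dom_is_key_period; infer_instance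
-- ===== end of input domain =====

-- B replaces the key-points-plus-margin and two explicit range checks by one
-- membership pass over a precomputed list of five merged intervals (simpler).


-- ===== PORT A =====
def is_key_period (normalized_period : Int) : Int :=
  let key_periods : List Int := [0, 45, 110, 120, 135, 160]
  let margin : Int := 5
  let is_near_key_period : Bool := key_periods.any (fun kp => |normalized_period - kp| ≤ margin)
  let in_halftime_range : Bool := 45 ≤ normalized_period && normalized_period ≤ 65
  let in_extensions_halftime_range : Bool := 135 ≤ normalized_period && normalized_period ≤ 145
  if is_near_key_period || in_halftime_range || in_extensions_halftime_range then 1 else 0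

-- ===== PORT B =====
def is_key_period_alt (normalized_period : Int) : Int :=
  let intervals : List (Int × Int) := [(-5, 5), (40, 65), (105, 125), (130, 145), (155, 165)]
  if intervals.any (fun p => p.1 ≤ normalized_period && normalized_period ≤ p.2) then 1 else 0

-- ===== PRECONDITION & SPEC =====
def Spec_is_key_period (normalized_period : Int) (out : Int) : Prop := out = is_key_period_alt normalized_period
instance (normalized_period : Int) (out : Int) : Decidable (Spec_is_key_period normalized_period out) := by unfold Spec_is_key_period; infer_instance

-- ===== CLAIM (what is proved, stated in full; the proofs are below) =====
def Claim_equal_is_key_period : Prop := ∀ (normalized_period : Int), Dom_is_key_period normalized_period → Spec_is_key_period normalized_period (is_key_period normalized_period)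

-- ===== LEMMAS AND PROOFS =====

-- ===== VERDICT (by name: the statement is the Claim_ definition above) =====
theorem is_key_period_spec : Claim_equal_is_key_period := by
  intro n _
  unfold Spec_is_key_period is_key_period is_key_period_alt
  simp only [List.any_cons, List.any_nil, abs_le, decide_eq_true_eq, Bool.or_eq_true,
    Bool.and_eq_true, Bool.or_false]
  split_ifs <;> first | rfl | omega
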